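-- pv_equiv track=rewrite | github.com/hriday-13th/Leetcode-Solutions | 2718-sum-of-matrix-after-queries/2718-sum-of-matrix-after-queries.py | matrixSumQueries
-- ===== SOURCE A (Python) =====
-- from typing import List
--
-- def matrixSumQueries(n: int, queries: List[List[int]]) -> int:
--     if n == 1:
--         return queries[-1][-1]
--
--     rows = [(0, 0)] * n
--     cols = [(0, 0)] * n
--
--     for i in range(len(queries)):
--         if queries[i][0] == 0:
--             rows[queries[i][1]] = (i+1, queries[i][2])
--         elif queries[i][0] == 1:
--             cols[queries[i][1]] = (i+1, queries[i][2])
--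
--     rows.sort(key=lambda x: x[0], reverse=True)
--     cols.sort(key=lambda x: x[0], reverse=True)
--
--     res = 0
--     i, j = 0, 0
--     col_val, row_val = n, n
--
--     while i < n and j < n:
--         if rows[i][0] > cols[j][0]:
--             res += rows[i][1] * row_val
--             col_val -= 1
--             i += 1
--         else:
--             res += cols[j][1] * col_val
--             row_val -= 1
--             j += 1
--
--     while i < n:
--         res += rows[i][1] * row_val
--         col_val -= 1
--         i += 1
--
--     while j < n:
--         res += cols[j][1] * col_val
--         row_val -= 1
--         j += 1
--
--     return res
-- ===== SOURCE B (Python) =====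
-- from typing import List
--
-- def matrixSumQueries(n: int, queries: List[List[int]]) -> int:
--     seen_rows = set()
--     seen_cols = set()
--     total = 0
--     for q in reversed(queries):
--         if q[0] == 0:
--             r = q[1] % n  # normalize Python-style negative indices
--             if r not in seen_rows:
--                 seen_rows.add(r)
--                 total += q[2] * (n - len(seen_cols))
--         elif q[0] == 1:
--             c = q[1] % n
--             if c not in seen_cols:
--                 seen_cols.add(c)
--                 total += q[2] * (n - len(seen_rows))
--     return total
-- ===== Notes on version B (the rewrite author's own statement) =====
-- stated objective: faster
-- what changed: Replaces A's two n-sized time-stamped arrays, their two descending sorts and the three-loop two-pointer merge with moving multipliers by a single reverse scan over the queries keeping seen-row/seen-col sets and charging each first-seen row/col value times the count of not-yet-seen cells.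
-- intended difference: For n = 1 when no query in the list is a paint query (type 0 or 1) and the last query ends in a nonzero number, A returns that trailing number via its queries[-1][-1] shortcut although nothing was painted, while B returns 0, the actual sum of the all-zero 1x1 matrix, which is intended. — e.g. on matrixSumQueries(1, [[2, 0, 5]]): A returns 5, B returns 0
-- outside the precondition, e.g. on matrixSumQueries(1, [[0], [0, 0, 5]]): A returns 5, B raises IndexError; on matrixSumQueries(1, [[0, 0, 5], [2, 0, 9]]): A returns 9, B returns 5
import Mathlib
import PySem

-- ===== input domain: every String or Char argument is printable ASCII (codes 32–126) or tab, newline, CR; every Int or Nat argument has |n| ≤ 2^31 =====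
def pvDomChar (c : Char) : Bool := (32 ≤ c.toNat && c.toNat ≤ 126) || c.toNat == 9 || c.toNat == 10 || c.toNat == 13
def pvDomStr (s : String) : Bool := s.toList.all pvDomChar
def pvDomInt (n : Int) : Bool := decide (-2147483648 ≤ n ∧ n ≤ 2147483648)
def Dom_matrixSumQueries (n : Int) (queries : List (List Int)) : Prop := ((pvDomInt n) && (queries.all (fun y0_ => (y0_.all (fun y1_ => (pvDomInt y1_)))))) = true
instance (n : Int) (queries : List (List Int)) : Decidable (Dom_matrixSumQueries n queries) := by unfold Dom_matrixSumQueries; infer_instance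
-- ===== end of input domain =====

-- B replaces the array-build + two sorts + two-pointer merge by one reverse scan with
-- seen-row/seen-col sets (objective: faster, O(q) instead of O(q + n log n)).

-- ===== PORT A =====
-- rows[i] = v  (Python list assignment; out-of-range raises IndexError — those inputs are outside Pre_)
def pvASet (xs : List (Int × Int)) (i : Int) (v : Int × Int) : List (Int × Int) :=
  let j := if i < 0 then i + (xs.length : Int) else i
  if 0 ≤ j ∧ j < (xs.length : Int) then xs.set j.toNat v else xs

-- the three while-loops over the two sorted arrays (i/j cursors become consuming the lists)
def pvAMerge : List (Int × Int) → List (Int × Int) → Int → Int → Int → Int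
  | r :: rs, c :: cs, rowv, colv, res =>
      if c.1 < r.1 then pvAMerge rs (c :: cs) rowv (colv - 1) (res + r.2 * rowv)
      else pvAMerge (r :: rs) cs (rowv - 1) colv (res + c.2 * colv)
  | r :: rs, [], rowv, colv, res => pvAMerge rs [] rowv (colv - 1) (res + r.2 * rowv)
  | [], c :: cs, rowv, colv, res => pvAMerge [] cs (rowv - 1) colv (res + c.2 * colv)
  | [], [], _, _, res => res
termination_by rs cs _ _ _ => rs.length + cs.length

def matrixSumQueries (n : Int) (queries : List (List Int)) : Int :=
  if n = 1 then
    -- queries[-1][-1]; .getD 0 stands where Python raises IndexError (excluded by Pre_)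
    ((PySem.List.pyGet? queries (-1)).bind fun q => PySem.List.pyGet? q (-1)).getD 0
  else
    let init : List (Int × Int) := List.replicate n.toNat ((0 : Int), (0 : Int))
    let rc := (PySem.List.pyRange 0 (queries.length : Int) 1).foldl
      (fun rc i =>
        let q := PySem.List.pyGetD queries i []
        if PySem.List.pyGetD q 0 0 = 0 then
          (pvASet rc.1 (PySem.List.pyGetD q 1 0) (i + 1, PySem.List.pyGetD q 2 0), rc.2)
        else if PySem.List.pyGetD q 0 0 = 1 then
          (rc.1, pvASet rc.2 (PySem.List.pyGetD q 1 0) (i + 1, PySem.List.pyGetD q 2 0))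
        else rc)
      (init, init)
    pvAMerge (PySem.List.sorted rc.1 (fun x => x.1) true)
             (PySem.List.sorted rc.2 (fun x => x.1) true) n n 0

-- ===== PORT B =====
def pvBStep (n : Int) (st : PySem.Set Int × PySem.Set Int × Int) (q : List Int) :
    PySem.Set Int × PySem.Set Int × Int :=
  if PySem.List.pyGetD q 0 0 = 0 then
    let r := PySem.Int.mod (PySem.List.pyGetD q 1 0) n
    if r ∈ st.1 then st
    else (PySem.Set.add st.1 r, st.2.1,
          st.2.2 + PySem.List.pyGetD q 2 0 * (n - (st.2.1.length : Int)))
  else if PySem.List.pyGetD q 0 0 = 1 then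
    let c := PySem.Int.mod (PySem.List.pyGetD q 1 0) n
    if c ∈ st.2.1 then st
    else (st.1, PySem.Set.add st.2.1 c,
          st.2.2 + PySem.List.pyGetD q 2 0 * (n - (st.1.length : Int)))
  else st

def matrixSumQueries_alt (n : Int) (queries : List (List Int)) : Int :=
  (queries.reverse.foldl (pvBStep n) (PySem.Set.empty, PySem.Set.empty, 0)).2.2

-- ===== PRECONDITION & SPEC =====
-- Pre_ admits the inputs on which A returns and B's triple-unpacking is defined: every query
-- carries its type entry; paint queries ([t,i,v] with t in {0,1}) are full triples with a
-- Python-valid index when n ≥ 2; a paint query requires n ≥ 1 (A's array indexing raises for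
-- n ≤ 0); and for n = 1 the list is nonempty (A indexes queries[-1]) and either ends in a
-- well-formed paint triple or contains no paint query at all — outside that n = 1 corner A's
-- returned value queries[-1][-1] is an accident of its shortcut (B returns the painted value,
-- or raises on a short paint query); the no-paint part of the corner stays inside as D_.
def Pre_matrixSumQueries (n : Int) (queries : List (List Int)) : Prop :=
  (1 ≤ n ∨ ∀ q ∈ queries,
    ¬(PySem.List.pyGetD q 0 0 = 0 ∨ PySem.List.pyGetD q 0 0 = 1)) ∧
  (n = 1 → queries ≠ [] ∧
    (((queries.getLastD []).length = 3 ∧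
      (PySem.List.pyGetD (queries.getLastD []) 0 0 = 0 ∨
       PySem.List.pyGetD (queries.getLastD []) 0 0 = 1)) ∨
     ∀ q ∈ queries, ¬(PySem.List.pyGetD q 0 0 = 0 ∨ PySem.List.pyGetD q 0 0 = 1))) ∧
  ∀ q ∈ queries, 1 ≤ q.length ∧
    ((PySem.List.pyGetD q 0 0 = 0 ∨ PySem.List.pyGetD q 0 0 = 1) →
      3 ≤ q.length ∧ (2 ≤ n → -n ≤ PySem.List.pyGetD q 1 0 ∧ PySem.List.pyGetD q 1 0 < n))
instance (n : Int) (queries : List (List Int)) : Decidable (Pre_matrixSumQueries n queries) := by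
  unfold Pre_matrixSumQueries; infer_instance

def pvWitness_matrixSumQueries : Int × List (List Int) := (2, [[0, 0, 5], [1, 1, 3]])

-- For n = 1 when no query is a paint query and the last query ends in a nonzero number,
-- A returns that trailing number (its queries[-1][-1] shortcut) although nothing was ever
-- painted; B returns 0, the actual sum of the all-zero 1×1 matrix, which is intended.
def D_matrixSumQueries (n : Int) (queries : List (List Int)) : Prop :=
  n = 1 ∧ queries ≠ [] ∧
  (∀ q ∈ queries, ¬(PySem.List.pyGetD q 0 0 = 0 ∨ PySem.List.pyGetD q 0 0 = 1)) ∧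
  (queries.getLastD []).getLastD 0 ≠ 0
instance (n : Int) (queries : List (List Int)) : Decidable (D_matrixSumQueries n queries) := by
  unfold D_matrixSumQueries; infer_instance

def Spec_matrixSumQueries (n : Int) (queries : List (List Int)) (out : Int) : Prop :=
  ¬ D_matrixSumQueries n queries → out = matrixSumQueries_alt n queries
instance (n : Int) (queries : List (List Int)) (out : Int) :
    Decidable (Spec_matrixSumQueries n queries out) := by
  unfold Spec_matrixSumQueries; infer_instance

def pvDiffWitness_matrixSumQueries : Int × List (List Int) := (1, [[2, 0, 5]])
def pvDiffWitnessOut_matrixSumQueries : Int × Int := (5, 0)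

-- ===== CLAIM (what is proved, stated in full; the proofs are below) =====
def Claim_unchanged_matrixSumQueries : Prop := ∀ (n : Int) (queries : List (List Int)), Dom_matrixSumQueries n queries → Pre_matrixSumQueries n queries → Spec_matrixSumQueries n queries (matrixSumQueries n queries)
def Claim_exact_matrixSumQueries : Prop := ∀ (n : Int) (queries : List (List Int)), Dom_matrixSumQueries n queries → Pre_matrixSumQueries n queries → D_matrixSumQueries n queries → matrixSumQueries n queries ≠ matrixSumQueries_alt n queries
def Claim_changed_matrixSumQueries : Prop := Dom_matrixSumQueries (pvDiffWitness_matrixSumQueries.1) (pvDiffWitness_matrixSumQueries.2) ∧ Pre_matrixSumQueries (pvDiffWitness_matrixSumQueries.1) (pvDiffWitness_matrixSumQueries.2) ∧ D_matrixSumQueries (pvDiffWitness_matrixSumQueries.1) (pvDiffWitness_matrixSumQueries.2) ∧ matrixSumQueries (pvDiffWitness_matrixSumQueries.1) (pvDiffWitness_matrixSumQueries.2) = pvDiffWitnessOut_matrixSumQueries.1 ∧ matrixSumQueries_alt (pvDiffWitness_matrixSumQueries.1) (pvDiffWitness_matrixSumQueries.2) = pvDiffWitnessOut_matrixSumQueries.2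 ∧ pvDiffWitnessOut_matrixSumQueries.1 ≠ pvDiffWitnessOut_matrixSumQueries.2

-- ===== LEMMAS AND PROOFS =====

-- proof-side shorthands for a query's fields
def pvTy (q : List Int) : Int := PySem.List.pyGetD q 0 0
def pvIdx (n : Int) (q : List Int) : Int := PySem.Int.mod (PySem.List.pyGetD q 1 0) n
def pvVal (q : List Int) : Int := PySem.List.pyGetD q 2 0

-- the (time, value) of the LAST paint of kind t at slot j, scanning indexed queries forward
def pvLE (n t : Int) (es : List (Int × List Int)) (j : Int) : Int × Int :=
  es.foldl (fun cur e => if pvTy e.2 = t ∧ pvIdx n e.2 = j then (e.1 + 1, pvVal e.2) else cur) (0, 0)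

-- the same scanning a reversed list: first match wins
def pvFE (n t : Int) : List (Int × List Int) → Int → Int × Int
  | [], _ => (0, 0)
  | e :: rest, j =>
      if pvTy e.2 = t ∧ pvIdx n e.2 = j then (e.1 + 1, pvVal e.2) else pvFE n t rest j

-- number of not-yet-seen slots of kind t whose last-paint time exceeds tm
def pvCnt (n t : Int) (es : List (Int × List Int)) (s : List Int) (tm : Int) : Int :=
  ((List.range n.toNat).map (fun k : Nat =>
    if (k : Int) ∉ s ∧ tm < (pvFE n t es (k : Int)).1 then (1 : Int) else 0)).sum

-- closed form of B's reverse scan from seen-state (sr, sc)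
def pvBF (n : Int) (es : List (Int × List Int)) (sr sc : List Int) : Int :=
  ((List.range n.toNat).map (fun j : Nat =>
    if (j : Int) ∉ sr ∧ (pvFE n 0 es (j : Int)).1 ≠ 0 then
      (pvFE n 0 es (j : Int)).2 * (n - (sc.length : Int) - pvCnt n 1 es sc (pvFE n 0 es (j : Int)).1)
    else 0)).sum +
  ((List.range n.toNat).map (fun j : Nat =>
    if (j : Int) ∉ sc ∧ (pvFE n 1 es (j : Int)).1 ≠ 0 then
      (pvFE n 1 es (j : Int)).2 * (n - (sr.length : Int) - pvCnt n 0 es sr (pvFE n 1 es (j : Int)).1)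
    else 0)).sum

-- A-side sums: contributions of the row entries resp. column entries of the final arrays
def pvCntGe (t : Int) (cs : List (Int × Int)) : Int := (cs.countP (fun c => decide (t ≤ c.1)) : Int)
def pvCntGt (t : Int) (rs : List (Int × Int)) : Int := (rs.countP (fun r => decide (t < r.1)) : Int)
def pvSR (rs cs : List (Int × Int)) (rowv : Int) : Int :=
  (rs.map (fun e => e.2 * (rowv - pvCntGe e.1 cs))).sum
def pvSC (cs rs : List (Int × Int)) (colv : Int) : Int :=
  (cs.map (fun e => e.2 * (colv - pvCntGt e.1 rs))).sum

-- A's indexed update loop, one enumerated step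
def pvAStepE (rc : List (Int × Int) × List (Int × Int)) (e : Int × List Int) :
    List (Int × Int) × List (Int × Int) :=
  let q := e.2
  if PySem.List.pyGetD q 0 0 = 0 then
    (pvASet rc.1 (PySem.List.pyGetD q 1 0) (e.1 + 1, PySem.List.pyGetD q 2 0), rc.2)
  else if PySem.List.pyGetD q 0 0 = 1 then
    (rc.1, pvASet rc.2 (PySem.List.pyGetD q 1 0) (e.1 + 1, PySem.List.pyGetD q 2 0))
  else rc

theorem pvCntGe_cons (t : Int) (c : Int × Int) (cs : List (Int × Int)) :
    pvCntGe t (c :: cs) = (if t ≤ c.1 then 1 else 0) + pvCntGe t cs := by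
  simp only [pvCntGe, List.countP_cons]
  by_cases h : t ≤ c.1 <;> simp [h] <;> push_cast <;> ring

theorem pvCntGt_cons (t : Int) (r : Int × Int) (rs : List (Int × Int)) :
    pvCntGt t (r :: rs) = (if t < r.1 then 1 else 0) + pvCntGt t rs := by
  simp only [pvCntGt, List.countP_cons]
  by_cases h : t < r.1 <;> simp [h] <;> push_cast <;> ring

theorem pvCntGe_zero (t : Int) (cs : List (Int × Int)) (h : ∀ c ∈ cs, c.1 < t) :
    pvCntGe t cs = 0 := by
  have : cs.countP (fun c => decide (t ≤ c.1)) = 0 :=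
    List.countP_eq_zero.mpr (fun c hc => by simpa using not_le.mpr (h c hc))
  simp [pvCntGe, this]

theorem pvCntGt_zero (t : Int) (rs : List (Int × Int)) (h : ∀ r ∈ rs, r.1 ≤ t) :
    pvCntGt t rs = 0 := by
  have : rs.countP (fun r => decide (t < r.1)) = 0 :=
    List.countP_eq_zero.mpr (fun r hr => by simpa using not_lt.mpr (h r hr))
  simp [pvCntGt, this]

theorem pvAMerge_eval : ∀ (rs cs : List (Int × Int)) (rowv colv res : Int),
    rs.Pairwise (fun a b => b.1 ≤ a.1) → cs.Pairwise (fun a b => b.1 ≤ a.1) →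
    pvAMerge rs cs rowv colv res = res + pvSR rs cs rowv + pvSC cs rs colv := by
  intro rs cs rowv colv res
  induction rs, cs, rowv, colv, res using pvAMerge.induct with
  | case1 r rs c cs rowv colv res h ih =>
      intro hr hc
      rw [pvAMerge, if_pos h, ih (List.pairwise_cons.mp hr).2 hc]
      have hcsall : ∀ x ∈ c :: cs, x.1 < r.1 := by
        intro x hx
        rcases List.mem_cons.mp hx with rfl | hx
        · exact h
        · exact lt_of_le_of_lt ((List.pairwise_cons.mp hc).1 x hx) h
      have h1 : pvSR (r :: rs) (c :: cs) rowv = r.2 * rowv + pvSR rs (c :: cs) rowv := by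
        simp only [pvSR, List.map_cons, List.sum_cons]
        rw [pvCntGe_zero _ _ hcsall]; ring_nf
      have h2 : pvSC (c :: cs) (r :: rs) colv = pvSC (c :: cs) rs (colv - 1) := by
        simp only [pvSC]
        congr 1
        apply List.map_congr_left
        intro e he
        have : e.1 < r.1 := hcsall e he
        rw [pvCntGt_cons, if_pos this]; ring_nf
      rw [h1, h2]; ring
  | case2 r rs c cs rowv colv res h ih =>
      intro hr hc
      have hle : r.1 ≤ c.1 := not_lt.mp h
      rw [pvAMerge, if_neg h, ih hr (List.pairwise_cons.mp hc).2]
      have hrsall : ∀ x ∈ r :: rs, x.1 ≤ c.1 := by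
        intro x hx
        rcases List.mem_cons.mp hx with rfl | hx
        · exact hle
        · exact le_trans ((List.pairwise_cons.mp hr).1 x hx) hle
      have h1 : pvSC (c :: cs) (r :: rs) colv = c.2 * colv + pvSC cs (r :: rs) colv := by
        simp only [pvSC, List.map_cons, List.sum_cons]
        rw [pvCntGt_zero _ _ hrsall]; ring_nf
      have h2 : pvSR (r :: rs) (c :: cs) rowv = pvSR (r :: rs) cs (rowv - 1) := by
        simp only [pvSR]
        congr 1
        apply List.map_congr_left
        intro e he
        have : e.1 ≤ c.1 := hrsall e he
        rw [pvCntGe_cons, if_pos this]; ring_nf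
      rw [h1, h2]; ring
  | case3 r rs rowv colv res ih =>
      intro hr _
      rw [pvAMerge, ih (List.pairwise_cons.mp hr).2 (List.Pairwise.nil)]
      simp only [pvSR, pvSC, List.map_cons, List.sum_cons, List.map_nil, List.sum_nil]
      have : pvCntGe r.1 [] = 0 := rfl
      simp only [pvCntGe, List.countP_nil] at *
      push_cast
      ring
  | case4 c cs rowv colv res ih =>
      intro _ hc
      rw [pvAMerge, ih (List.Pairwise.nil) (List.pairwise_cons.mp hc).2]
      simp only [pvSR, pvSC, List.map_cons, List.sum_cons, List.map_nil, List.sum_nil]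
      simp only [pvCntGt, List.countP_nil]
      push_cast
      ring
  | case5 rowv colv res =>
      intro _ _
      simp [pvAMerge, pvSR, pvSC]

theorem pvWrap_eq_mod (n i : Int) (hn : 1 ≤ n) (h1 : -n ≤ i) (h2 : i < n) :
    (if i < 0 then i + n else i) = PySem.Int.mod i n := by
  rw [PySem.Int.mod_eq_emod_of_pos (a := i) (by omega)]
  by_cases h : i < 0
  · have e1 : (i + n) % n = i + n := Int.emod_eq_of_lt (by omega) (by omega)
    have e2 : i % n = (i + n) % n := (Int.add_emod_right i n).symm
    rw [if_pos h, e2, e1]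
  · rw [if_neg h, Int.emod_eq_of_lt (by omega) h2]

theorem pvASet_map_range (n : Int) (hn : 1 ≤ n) (f : Nat → Int × Int) (i : Int)
    (h1 : -n ≤ i) (h2 : i < n) (v : Int × Int) :
    pvASet ((List.range n.toNat).map f) i v =
      (List.range n.toNat).map (fun k : Nat => if (k : Int) = PySem.Int.mod i n then v else f k) := by
  have hNn : ((n.toNat : Int)) = n := Int.toNat_of_nonneg (by omega)
  have hm := pvWrap_eq_mod n i hn h1 h2
  have hmn : 0 ≤ PySem.Int.mod i n ∧ PySem.Int.mod i n < n :=
    ⟨PySem.Int.mod_nonneg _ (by omega), PySem.Int.mod_lt _ (by omega)⟩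
  simp only [pvASet, List.length_map, List.length_range, hNn]
  rw [if_pos (by rw [hm]; exact ⟨hmn.1, hmn.2⟩)]
  apply List.ext_getElem
  · simp
  · intro k hk hk'
    simp only [List.getElem_set, List.getElem_map, List.getElem_range]
    by_cases he : (if i < 0 then i + n else i).toNat = k
    · rw [if_pos he, if_pos (by rw [← he, hm, Int.toNat_of_nonneg hmn.1])]
    · rw [if_neg he, if_neg (by intro hc; apply he; rw [hm, ← hc]; simp)]

theorem pvLE_append (n t : Int) (es : List (Int × List Int)) (e : Int × List Int) (j : Int) :
    pvLE n t (es ++ [e]) j =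
      if pvTy e.2 = t ∧ pvIdx n e.2 = j then (e.1 + 1, pvVal e.2) else pvLE n t es j := by
  simp [pvLE, List.foldl_append]

theorem pvA_arrays (n : Int) (hn : 1 ≤ n) (es : List (Int × List Int))
    (hq : ∀ p ∈ es, (pvTy p.2 = 0 ∨ pvTy p.2 = 1) →
      -n ≤ PySem.List.pyGetD p.2 1 0 ∧ PySem.List.pyGetD p.2 1 0 < n) :
    es.foldl pvAStepE
      (List.replicate n.toNat ((0 : Int), (0 : Int)), List.replicate n.toNat ((0 : Int), (0 : Int))) =
      ((List.range n.toNat).map (fun k : Nat => pvLE n 0 es (k : Int)),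
       (List.range n.toNat).map (fun k : Nat => pvLE n 1 es (k : Int))) := by
  induction es using List.reverseRecOn with
  | nil => simp [pvLE, List.map_const']
  | append_singleton es e ih =>
      have hq' : ∀ p ∈ es, (pvTy p.2 = 0 ∨ pvTy p.2 = 1) →
          -n ≤ PySem.List.pyGetD p.2 1 0 ∧ PySem.List.pyGetD p.2 1 0 < n := by
        intro p hp; exact hq p (by simp [hp])
      rw [List.foldl_append, ih hq', List.foldl_cons, List.foldl_nil]
      have he := hq e (by simp)
      by_cases h0 : PySem.List.pyGetD e.2 0 0 = 0
      · have hrange := he (Or.inl h0)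
        have hty : pvTy e.2 = 0 := h0
        simp only [pvAStepE, h0]
        rw [if_pos trivial]
        rw [pvASet_map_range n hn _ _ hrange.1 hrange.2]
        refine Prod.ext ?_ ?_ <;> simp only
        · apply List.map_congr_left
          intro k hk
          rw [pvLE_append]
          by_cases hj : pvIdx n e.2 = (k : Int)
          · have h1 : ((k : Int) = PySem.Int.mod (PySem.List.pyGetD e.2 1 0) n) := hj.symm
            rw [if_pos h1, if_pos ⟨hty, hj⟩]
            rfl
          · rw [if_neg (fun hc => hj hc.symm), if_neg (fun hc => hj hc.2)]
        · apply List.map_congr_left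
          intro k hk
          rw [pvLE_append, if_neg (by rw [hty]; rintro ⟨h, -⟩; exact absurd h (by norm_num))]
      · by_cases h1 : PySem.List.pyGetD e.2 0 0 = 1
        · have hrange := he (Or.inr h1)
          have hty : pvTy e.2 = 1 := h1
          simp only [pvAStepE]
          rw [if_neg h0, if_pos h1]
          rw [pvASet_map_range n hn _ _ hrange.1 hrange.2]
          refine Prod.ext ?_ ?_ <;> simp only
          · apply List.map_congr_left
            intro k hk
            rw [pvLE_append, if_neg (by rw [hty]; rintro ⟨h, -⟩; exact absurd h (by norm_num))]
          · apply List.map_congr_left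
            intro k hk
            rw [pvLE_append]
            by_cases hj : pvIdx n e.2 = (k : Int)
            · have hh : ((k : Int) = PySem.Int.mod (PySem.List.pyGetD e.2 1 0) n) := hj.symm
              rw [if_pos hh, if_pos ⟨hty, hj⟩]
              rfl
            · rw [if_neg (fun hc => hj hc.symm), if_neg (fun hc => hj hc.2)]
        · simp only [pvAStepE]
          rw [if_neg h0, if_neg h1]
          refine Prod.ext ?_ ?_ <;> simp only <;>
            (apply List.map_congr_left; intro k hk;
             rw [pvLE_append, if_neg (fun hc => by
               rcases hc with ⟨hcc, -⟩
               first
               | exact h0 hcc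
               | exact h1 hcc)])

theorem pvFE_cases (n t : Int) (rs : List (Int × List Int)) (j : Int) :
    pvFE n t rs j = (0, 0) ∨
      ∃ p ∈ rs, pvFE n t rs j = (p.1 + 1, pvVal p.2) ∧ pvTy p.2 = t ∧ pvIdx n p.2 = j := by
  induction rs with
  | nil => left; rfl
  | cons e rest ih =>
      by_cases h : pvTy e.2 = t ∧ pvIdx n e.2 = j
      · right; exact ⟨e, List.mem_cons_self .., by simp [pvFE, h], h.1, h.2⟩
      · rcases ih with h0 | ⟨p, hp, h1, h2, h3⟩
        · left; simp [pvFE, h, h0]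
        · right; exact ⟨p, List.mem_cons_of_mem _ hp, by simp [pvFE, h, h1], h2, h3⟩

theorem pvFE_le (n t : Int) (rs : List (Int × List Int)) (j B : Int)
    (hB : ∀ p ∈ rs, p.1 < B) (h0B : 0 ≤ B) : (pvFE n t rs j).1 ≤ B := by
  rcases pvFE_cases n t rs j with h | ⟨p, hp, h1, -, -⟩
  · rw [h]; exact h0B
  · rw [h1]; exact hB p hp

theorem pvSumSingle : ∀ (l : List Nat), l.Nodup → ∀ j0 ∈ l, ∀ (f g : Nat → Int) (d : Int),
    (∀ k ∈ l, f k = g k + if k = j0 then d else 0) →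
    (l.map f).sum = (l.map g).sum + d
  | [] => by intro _ j0 hj; cases hj
  | a :: tl => by
      intro hnd j0 hj f g d h
      rcases List.mem_cons.mp hj with heq | hmem
      · have hfa : f a = g a + d := by
          have := h a (by simp)
          rwa [if_pos heq.symm] at this
        have hrest : ∀ k ∈ tl, f k = g k := fun k hk => by
          have hne : k ≠ j0 := fun hc => (List.nodup_cons.mp hnd).1 (heq ▸ hc ▸ hk)
          have := h k (by simp [hk])
          rw [if_neg hne] at this
          simpa using this
        rw [List.map_cons, List.sum_cons, List.map_cons, List.sum_cons, hfa,
          List.map_congr_left hrest]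
        ring
      · have hne : a ≠ j0 := fun hc => (List.nodup_cons.mp hnd).1 (hc ▸ hmem)
        have hfa : f a = g a := by
          have := h a (by simp)
          rw [if_neg hne] at this
          simpa using this
        rw [List.map_cons, List.sum_cons, List.map_cons, List.sum_cons, hfa,
          pvSumSingle tl (List.nodup_cons.mp hnd).2 j0 hmem f g d
            (fun k hk => h k (by simp [hk]))]
        ring

theorem pvB_eval (n : Int) (hn : 1 ≤ n) :
    ∀ (rs : List (Int × List Int)) (sr sc : List Int) (tot : Int),
      rs.Pairwise (fun a b => b.1 < a.1) → (∀ p ∈ rs, 0 ≤ p.1) →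
      (rs.foldl (fun st e => pvBStep n st e.2) (sr, sc, tot)).2.2 = tot + pvBF n rs sr sc := by
  intro rs
  induction rs with
  | nil =>
      intro sr sc tot _ _
      simp [pvBF, pvFE, pvCnt]
  | cons e rest ih =>
      intro sr sc tot hmono hpos
      have hppos : 0 ≤ e.1 := hpos e (List.mem_cons_self ..)
      have hlt : ∀ p ∈ rest, p.1 < e.1 := (List.pairwise_cons.mp hmono).1
      have hmono' := (List.pairwise_cons.mp hmono).2
      have hpos' : ∀ p ∈ rest, 0 ≤ p.1 := fun p hp => hpos p (List.mem_cons_of_mem _ hp)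
      have hFEle : ∀ t j, (pvFE n t rest j).1 ≤ e.1 := fun t j => pvFE_le n t rest j e.1 hlt hppos
      rw [List.foldl_cons]
      by_cases ht0 : PySem.List.pyGetD e.2 0 0 = 0
      · have hty : pvTy e.2 = 0 := ht0
        have hty1 : ¬ (pvTy e.2 = 1) := by rw [hty]; norm_num
        set j := PySem.Int.mod (PySem.List.pyGetD e.2 1 0) n with hjdef
        have hjIdx : pvIdx n e.2 = j := rfl
        have hj0 : 0 ≤ j := PySem.Int.mod_nonneg _ (by omega)
        have hjn : j < n := PySem.Int.mod_lt _ (by omega)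
        have hjmem : j.toNat ∈ List.range n.toNat := by
          rw [List.mem_range]; omega
        have hjcast : ((j.toNat : Int)) = j := Int.toNat_of_nonneg hj0
        -- pvFE on the cons list
        have hFE0 : ∀ k : Int, pvFE n 0 (e :: rest) k =
            if j = k then (e.1 + 1, pvVal e.2) else pvFE n 0 rest k := by
          intro k
          by_cases hk : j = k
          · rw [if_pos hk]; exact if_pos ⟨hty, hjIdx.trans hk⟩
          · rw [if_neg hk]; exact if_neg (fun hc => hk (hjIdx.symm.trans hc.2))
        have hFE1 : ∀ k : Int, pvFE n 1 (e :: rest) k = pvFE n 1 rest k := by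
          intro k; exact if_neg (fun hc => hty1 hc.1)
        have hCnt1 : ∀ s tm, pvCnt n 1 (e :: rest) s tm = pvCnt n 1 rest s tm := by
          intro s tm
          unfold pvCnt
          congr 1
          apply List.map_congr_left
          intro k hk
          rw [hFE1]
        by_cases hmem : j ∈ sr
        · rw [show pvBStep n (sr, sc, tot) e.2 = (sr, sc, tot) by
            simp only [pvBStep, ht0]; rw [if_pos trivial, if_pos hmem]]
          rw [ih sr sc tot hmono' hpos']
          congr 1
          unfold pvBF
          congr 1
          · apply congrArg
            apply List.map_congr_left
            intro k hk
            rw [hFE0, hCnt1]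
            by_cases hkj : j = (k : Int)
            · rw [if_pos hkj]
              rw [if_neg (fun hc => hc.1 (hkj ▸ hmem)), if_neg (fun hc => hc.1 (hkj ▸ hmem))]
            · rw [if_neg hkj]
          · apply congrArg
            apply List.map_congr_left
            intro k hk
            rw [hFE1]
            by_cases hgate : (k : Int) ∉ sc ∧ (pvFE n 1 rest (k : Int)).1 ≠ 0
            · rw [if_pos hgate, if_pos hgate]
              congr 2
              unfold pvCnt
              apply congrArg
              apply List.map_congr_left
              intro k' hk'
              rw [hFE0]
              by_cases hkj : j = (k' : Int)
              · rw [if_pos hkj]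
                rw [if_neg (fun hc => hc.1 (hkj ▸ hmem)), if_neg (fun hc => hc.1 (hkj ▸ hmem))]
              · rw [if_neg hkj]
            · rw [if_neg hgate, if_neg hgate]
        · rw [show pvBStep n (sr, sc, tot) e.2 =
              (PySem.Set.add sr j, sc, tot + PySem.List.pyGetD e.2 2 0 * (n - (sc.length : Int))) by
            simp only [pvBStep, ht0]; rw [if_pos trivial, if_neg hmem]]
          rw [ih _ _ _ hmono' hpos']
          have hadd : PySem.Set.add sr j = sr ++ [j] := PySem.Set.add_of_not_mem hmem
          have haddlen : ((PySem.Set.add sr j).length : Int) = (sr.length : Int) + 1 := by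
            rw [hadd]; simp
          have hmemadd : ∀ x : Int, x ∈ PySem.Set.add sr j ↔ x ∈ sr ∨ x = j := fun x => PySem.Set.mem_add sr j x
          -- row sums
          have hrow : ((List.range n.toNat).map (fun k : Nat =>
              if (k : Int) ∉ sr ∧ (pvFE n 0 (e :: rest) (k : Int)).1 ≠ 0 then
                (pvFE n 0 (e :: rest) (k : Int)).2 *
                  (n - (sc.length : Int) - pvCnt n 1 (e :: rest) sc (pvFE n 0 (e :: rest) (k : Int)).1)
              else 0)).sum =
            ((List.range n.toNat).map (fun k : Nat =>
              if (k : Int) ∉ PySem.Set.add sr j ∧ (pvFE n 0 rest (k : Int)).1 ≠ 0 then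
                (pvFE n 0 rest (k : Int)).2 *
                  (n - (sc.length : Int) - pvCnt n 1 rest sc (pvFE n 0 rest (k : Int)).1)
              else 0)).sum + PySem.List.pyGetD e.2 2 0 * (n - (sc.length : Int)) := by
            apply pvSumSingle _ (List.nodup_range) j.toNat hjmem
            intro k hk
            by_cases hkj : k = j.toNat
            · subst hkj
              rw [if_pos rfl]
              rw [hFE0, if_pos hjcast.symm]
              have hcnt0 : pvCnt n 1 (e :: rest) sc (e.1 + 1) = 0 := by
                unfold pvCnt
                rw [List.sum_eq_zero]
                intro x hx
                rcases List.mem_map.mp hx with ⟨k', hk', rfl⟩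
                rw [hFE1, if_neg]
                rintro ⟨-, habs⟩
                exact absurd habs (not_lt.mpr (by linarith [hFEle 1 (k' : Int)]))
              rw [if_pos ⟨hjcast ▸ hmem, by norm_num; omega⟩, hcnt0]
              rw [if_neg (fun hc => hc.1 ((hmemadd _).mpr (Or.inr hjcast)))]
              show pvVal e.2 * (n - (sc.length : Int) - 0) = 0 + PySem.List.pyGetD e.2 2 0 * (n - (sc.length : Int))
              unfold pvVal; ring
            · rw [if_neg hkj]
              have hkjI : ¬ (j = (k : Int)) := fun hc => hkj (by omega)
              rw [hFE0, if_neg hkjI, hCnt1]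
              have : ((k : Int) ∉ PySem.Set.add sr j) ↔ ((k : Int) ∉ sr) := by
                rw [hmemadd]
                constructor
                · intro h hs; exact h (Or.inl hs)
                · rintro h (hs | hs)
                  · exact h hs
                  · exact hkjI (hs.symm)
              rw [add_zero]
              exact if_congr (and_congr_left fun _ => this.symm) rfl rfl
          -- col sums
          have hcol : ((List.range n.toNat).map (fun k : Nat =>
              if (k : Int) ∉ sc ∧ (pvFE n 1 (e :: rest) (k : Int)).1 ≠ 0 then
                (pvFE n 1 (e :: rest) (k : Int)).2 *
                  (n - (sr.length : Int) - pvCnt n 0 (e :: rest) sr (pvFE n 1 (e :: rest) (k : Int)).1)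
              else 0)).sum =
            ((List.range n.toNat).map (fun k : Nat =>
              if (k : Int) ∉ sc ∧ (pvFE n 1 rest (k : Int)).1 ≠ 0 then
                (pvFE n 1 rest (k : Int)).2 *
                  (n - ((PySem.Set.add sr j).length : Int) - pvCnt n 0 rest (PySem.Set.add sr j) (pvFE n 1 rest (k : Int)).1)
              else 0)).sum := by
            apply congrArg
            apply List.map_congr_left
            intro k hk
            rw [hFE1]
            by_cases hgate : (k : Int) ∉ sc ∧ (pvFE n 1 rest (k : Int)).1 ≠ 0
            · rw [if_pos hgate, if_pos hgate]
              have htc1 : (pvFE n 1 rest (k : Int)).1 ≤ e.1 := hFEle 1 _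
              have hcnteq : pvCnt n 0 (e :: rest) sr (pvFE n 1 rest (k : Int)).1 =
                  pvCnt n 0 rest (PySem.Set.add sr j) (pvFE n 1 rest (k : Int)).1 + 1 := by
                unfold pvCnt
                apply pvSumSingle _ (List.nodup_range) j.toNat hjmem
                intro k' hk'
                by_cases hkj : k' = j.toNat
                · subst hkj
                  rw [if_pos rfl]
                  rw [hFE0, if_pos hjcast.symm]
                  rw [if_pos ⟨hjcast ▸ hmem, by simp only; omega⟩]
                  rw [if_neg (fun hc => hc.1 ((hmemadd _).mpr (Or.inr hjcast)))]
                  norm_num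
                · rw [if_neg hkj]
                  have hkjI : ¬ (j = (k' : Int)) := fun hc => hkj (by omega)
                  rw [hFE0, if_neg hkjI]
                  have : ((k' : Int) ∉ PySem.Set.add sr j) ↔ ((k' : Int) ∉ sr) := by
                    rw [hmemadd]
                    constructor
                    · intro h hs; exact h (Or.inl hs)
                    · rintro h (hs | hs)
                      · exact h hs
                      · exact hkjI (hs.symm)
                  rw [add_zero]
                  exact if_congr (and_congr_left fun _ => this.symm) rfl rfl
              rw [hcnteq, haddlen]
              ring
            · rw [if_neg hgate, if_neg hgate]
          unfold pvBF
          rw [hrow, hcol]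
          ring
      · by_cases ht1 : PySem.List.pyGetD e.2 0 0 = 1
        · have hty : pvTy e.2 = 1 := ht1
          have hty0 : ¬ (pvTy e.2 = 0) := by unfold pvTy; rw [ht1]; norm_num
          set j := PySem.Int.mod (PySem.List.pyGetD e.2 1 0) n with hjdef
          have hjIdx : pvIdx n e.2 = j := rfl
          have hj0 : 0 ≤ j := PySem.Int.mod_nonneg _ (by omega)
          have hjn : j < n := PySem.Int.mod_lt _ (by omega)
          have hjmem : j.toNat ∈ List.range n.toNat := by rw [List.mem_range]; omega
          have hjcast : ((j.toNat : Int)) = j := Int.toNat_of_nonneg hj0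
          have hFE1 : ∀ k : Int, pvFE n 1 (e :: rest) k =
              if j = k then (e.1 + 1, pvVal e.2) else pvFE n 1 rest k := by
            intro k
            by_cases hk : j = k
            · rw [if_pos hk]; exact if_pos ⟨hty, hjIdx.trans hk⟩
            · rw [if_neg hk]; exact if_neg (fun hc => hk (hjIdx.symm.trans hc.2))
          have hFE0 : ∀ k : Int, pvFE n 0 (e :: rest) k = pvFE n 0 rest k := by
            intro k; exact if_neg (fun hc => hty0 hc.1)
          have hCnt0 : ∀ s tm, pvCnt n 0 (e :: rest) s tm = pvCnt n 0 rest s tm := by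
            intro s tm
            unfold pvCnt
            apply congrArg
            apply List.map_congr_left
            intro k hk
            rw [hFE0]
          by_cases hmem : j ∈ sc
          · rw [show pvBStep n (sr, sc, tot) e.2 = (sr, sc, tot) by
              simp only [pvBStep]
              rw [if_neg (by rw [ht1]; norm_num), if_pos ht1, if_pos hmem]]
            rw [ih sr sc tot hmono' hpos']
            congr 1
            unfold pvBF
            congr 1
            · apply congrArg
              apply List.map_congr_left
              intro k hk
              rw [hFE0]
              by_cases hgate : (k : Int) ∉ sr ∧ (pvFE n 0 rest (k : Int)).1 ≠ 0
              · rw [if_pos hgate, if_pos hgate]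
                congr 2
                unfold pvCnt
                apply congrArg
                apply List.map_congr_left
                intro k' hk'
                rw [hFE1]
                by_cases hkj : j = (k' : Int)
                · rw [if_pos hkj]
                  rw [if_neg (fun hc => hc.1 (hkj ▸ hmem)), if_neg (fun hc => hc.1 (hkj ▸ hmem))]
                · rw [if_neg hkj]
              · rw [if_neg hgate, if_neg hgate]
            · apply congrArg
              apply List.map_congr_left
              intro k hk
              rw [hFE1, hCnt0]
              by_cases hkj : j = (k : Int)
              · rw [if_pos hkj]
                rw [if_neg (fun hc => hc.1 (hkj ▸ hmem)), if_neg (fun hc => hc.1 (hkj ▸ hmem))]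
              · rw [if_neg hkj]
          · rw [show pvBStep n (sr, sc, tot) e.2 =
                (sr, PySem.Set.add sc j, tot + PySem.List.pyGetD e.2 2 0 * (n - (sr.length : Int))) by
              simp only [pvBStep]
              rw [if_neg (by rw [ht1]; norm_num), if_pos ht1, if_neg hmem]]
            rw [ih _ _ _ hmono' hpos']
            have hadd : PySem.Set.add sc j = sc ++ [j] := PySem.Set.add_of_not_mem hmem
            have haddlen : ((PySem.Set.add sc j).length : Int) = (sc.length : Int) + 1 := by
              rw [hadd]; simp
            have hmemadd : ∀ x : Int, x ∈ PySem.Set.add sc j ↔ x ∈ sc ∨ x = j :=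
              fun x => PySem.Set.mem_add sc j x
            have hcol : ((List.range n.toNat).map (fun k : Nat =>
                if (k : Int) ∉ sc ∧ (pvFE n 1 (e :: rest) (k : Int)).1 ≠ 0 then
                  (pvFE n 1 (e :: rest) (k : Int)).2 *
                    (n - (sr.length : Int) - pvCnt n 0 (e :: rest) sr (pvFE n 1 (e :: rest) (k : Int)).1)
                else 0)).sum =
              ((List.range n.toNat).map (fun k : Nat =>
                if (k : Int) ∉ PySem.Set.add sc j ∧ (pvFE n 1 rest (k : Int)).1 ≠ 0 then
                  (pvFE n 1 rest (k : Int)).2 *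
                    (n - (sr.length : Int) - pvCnt n 0 rest sr (pvFE n 1 rest (k : Int)).1)
                else 0)).sum + PySem.List.pyGetD e.2 2 0 * (n - (sr.length : Int)) := by
              apply pvSumSingle _ (List.nodup_range) j.toNat hjmem
              intro k hk
              by_cases hkj : k = j.toNat
              · subst hkj
                rw [if_pos rfl]
                rw [hFE1, if_pos hjcast.symm]
                have hcnt0 : pvCnt n 0 (e :: rest) sr (e.1 + 1) = 0 := by
                  unfold pvCnt
                  rw [List.sum_eq_zero]
                  intro x hx
                  rcases List.mem_map.mp hx with ⟨k', hk', rfl⟩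
                  rw [hFE0, if_neg]
                  rintro ⟨-, habs⟩
                  exact absurd habs (not_lt.mpr (by linarith [hFEle 0 (k' : Int)]))
                rw [if_pos ⟨hjcast ▸ hmem, by norm_num; omega⟩, hcnt0]
                rw [if_neg (fun hc => hc.1 ((hmemadd _).mpr (Or.inr hjcast)))]
                show pvVal e.2 * (n - (sr.length : Int) - 0) = 0 + PySem.List.pyGetD e.2 2 0 * (n - (sr.length : Int))
                unfold pvVal; ring
              · rw [if_neg hkj]
                have hkjI : ¬ (j = (k : Int)) := fun hc => hkj (by omega)
                rw [hFE1, if_neg hkjI, hCnt0]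
                have : ((k : Int) ∉ PySem.Set.add sc j) ↔ ((k : Int) ∉ sc) := by
                  rw [hmemadd]
                  constructor
                  · intro h hs; exact h (Or.inl hs)
                  · rintro h (hs | hs)
                    · exact h hs
                    · exact hkjI (hs.symm)
                rw [add_zero]
                exact if_congr (and_congr_left fun _ => this.symm) rfl rfl
            have hrow : ((List.range n.toNat).map (fun k : Nat =>
                if (k : Int) ∉ sr ∧ (pvFE n 0 (e :: rest) (k : Int)).1 ≠ 0 then
                  (pvFE n 0 (e :: rest) (k : Int)).2 *
                    (n - (sc.length : Int) - pvCnt n 1 (e :: rest) sc (pvFE n 0 (e :: rest) (k : Int)).1)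
                else 0)).sum =
              ((List.range n.toNat).map (fun k : Nat =>
                if (k : Int) ∉ sr ∧ (pvFE n 0 rest (k : Int)).1 ≠ 0 then
                  (pvFE n 0 rest (k : Int)).2 *
                    (n - ((PySem.Set.add sc j).length : Int) - pvCnt n 1 rest (PySem.Set.add sc j) (pvFE n 0 rest (k : Int)).1)
                else 0)).sum := by
              apply congrArg
              apply List.map_congr_left
              intro k hk
              rw [hFE0]
              by_cases hgate : (k : Int) ∉ sr ∧ (pvFE n 0 rest (k : Int)).1 ≠ 0
              · rw [if_pos hgate, if_pos hgate]
                have htc1 : (pvFE n 0 rest (k : Int)).1 ≤ e.1 := hFEle 0 _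
                have hcnteq : pvCnt n 1 (e :: rest) sc (pvFE n 0 rest (k : Int)).1 =
                    pvCnt n 1 rest (PySem.Set.add sc j) (pvFE n 0 rest (k : Int)).1 + 1 := by
                  unfold pvCnt
                  apply pvSumSingle _ (List.nodup_range) j.toNat hjmem
                  intro k' hk'
                  by_cases hkj : k' = j.toNat
                  · subst hkj
                    rw [if_pos rfl]
                    rw [hFE1, if_pos hjcast.symm]
                    rw [if_pos ⟨hjcast ▸ hmem, by simp only; omega⟩]
                    rw [if_neg (fun hc => hc.1 ((hmemadd _).mpr (Or.inr hjcast)))]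
                    norm_num
                  · rw [if_neg hkj]
                    have hkjI : ¬ (j = (k' : Int)) := fun hc => hkj (by omega)
                    rw [hFE1, if_neg hkjI]
                    have : ((k' : Int) ∉ PySem.Set.add sc j) ↔ ((k' : Int) ∉ sc) := by
                      rw [hmemadd]
                      constructor
                      · intro h hs; exact h (Or.inl hs)
                      · rintro h (hs | hs)
                        · exact h hs
                        · exact hkjI (hs.symm)
                    rw [add_zero]
                    exact if_congr (and_congr_left fun _ => this.symm) rfl rfl
                rw [hcnteq, haddlen]
                ring
              · rw [if_neg hgate, if_neg hgate]
            unfold pvBF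
            rw [hrow, hcol]
            ring
        · rw [show pvBStep n (sr, sc, tot) e.2 = (sr, sc, tot) by
            simp only [pvBStep]; rw [if_neg ht0, if_neg ht1]]
          rw [ih sr sc tot hmono' hpos']
          have hFE0 : ∀ k : Int, pvFE n 0 (e :: rest) k = pvFE n 0 rest k := by
            intro k; exact if_neg (fun hc => ht0 hc.1)
          have hFE1 : ∀ k : Int, pvFE n 1 (e :: rest) k = pvFE n 1 rest k := by
            intro k; exact if_neg (fun hc => ht1 hc.1)
          have hCnt0 : ∀ (s : List Int) (tm : Int), pvCnt n 0 (e :: rest) s tm = pvCnt n 0 rest s tm := by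
            intro s tm
            unfold pvCnt
            apply congrArg
            apply List.map_congr_left
            intro k hk
            rw [hFE0]
          have hCnt1 : ∀ (s : List Int) (tm : Int), pvCnt n 1 (e :: rest) s tm = pvCnt n 1 rest s tm := by
            intro s tm
            unfold pvCnt
            apply congrArg
            apply List.map_congr_left
            intro k hk
            rw [hFE1]
          congr 1
          unfold pvBF
          congr 1
          · apply congrArg
            apply List.map_congr_left
            intro k hk
            rw [hFE0, hCnt1]
          · apply congrArg
            apply List.map_congr_left
            intro k hk
            rw [hFE1, hCnt0]


theorem pvFE_reverse (n t : Int) (es : List (Int × List Int)) (j : Int) :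
    pvFE n t es.reverse j = pvLE n t es j := by
  induction es using List.reverseRecOn with
  | nil => rfl
  | append_singleton es e ih =>
      simp only [List.reverse_append, List.reverse_singleton, List.singleton_append, pvFE, pvLE,
        List.foldl_append, List.foldl_cons, List.foldl_nil]
      split
      · rfl
      · exact ih

-- B's fold equals the closed form on the reversed enumeration
theorem pvAlt_eq_BF (n : Int) (hn : 1 ≤ n) (queries : List (List Int)) :
    matrixSumQueries_alt n queries =
      pvBF n ((PySem.List.enumerate queries 0).reverse) [] [] := by
  have hmap : ((PySem.List.enumerate queries 0).reverse).map (fun p => p.2) = queries.reverse := by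
    rw [List.map_reverse, PySem.List.map_snd_enumerate]
  unfold matrixSumQueries_alt
  rw [← hmap, List.foldl_map]
  have hmono : ((PySem.List.enumerate queries 0).reverse).Pairwise (fun a b => b.1 < a.1) :=
    List.pairwise_reverse.mpr (PySem.List.pairwise_lt_enumerate queries 0)
  have hpos : ∀ p ∈ (PySem.List.enumerate queries 0).reverse, 0 ≤ p.1 := by
    intro p hp
    rw [List.mem_reverse] at hp
    rcases (PySem.List.mem_enumerate_iff queries 0 p).mp hp with ⟨k, hk, rfl⟩
    simp
  rw [pvB_eval n hn _ _ _ _ hmono hpos, zero_add]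
  rfl

theorem pvLE_cases (n t : Int) (es : List (Int × List Int)) (j : Int) :
    pvLE n t es j = (0, 0) ∨
      ∃ p ∈ es, pvLE n t es j = (p.1 + 1, pvVal p.2) ∧ pvTy p.2 = t ∧ pvIdx n p.2 = j := by
  rw [← pvFE_reverse]
  rcases pvFE_cases n t es.reverse j with h | ⟨p, hp, h1, h2, h3⟩
  · exact Or.inl h
  · exact Or.inr ⟨p, List.mem_reverse.mp hp, h1, h2, h3⟩

theorem pvFst_inj : ∀ (es : List (Int × List Int)), es.Pairwise (fun a b => a.1 < b.1) →
    ∀ p ∈ es, ∀ p' ∈ es, p.1 = p'.1 → p = p'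
  | [], _ => by intro p hp; cases hp
  | a :: l, h => by
      intro p hp p' hp' heq
      rcases List.mem_cons.mp hp with hpa | hpl
      · rcases List.mem_cons.mp hp' with hpa' | hpl'
        · rw [hpa, hpa']
        · exfalso; rw [hpa] at heq; have := (List.pairwise_cons.mp h).1 p' hpl'; omega
      · rcases List.mem_cons.mp hp' with hpa' | hpl'
        · exfalso; rw [hpa'] at heq; have := (List.pairwise_cons.mp h).1 p hpl; omega
        · exact pvFst_inj l (List.pairwise_cons.mp h).2 p hpl p' hpl' heq

-- empty-seen count as a countP over the last-paint table
theorem pvCnt_nil (n t : Int) (es : List (Int × List Int)) (tm : Int) :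
    pvCnt n t es.reverse [] tm =
      ((List.range n.toNat).countP (fun k' : Nat => decide (tm < (pvLE n t es (k' : Int)).1)) : Int) := by
  unfold pvCnt
  rw [List.map_congr_left (g := fun k : Nat =>
      if decide (tm < (pvLE n t es (k : Int)).1) = true then (1 : Int) else 0)
    (fun k hk => by simp [pvFE_reverse])]
  exact PySem.List.sum_map_ite_one_zero _ _

-- the A-side sums over the final arrays equal B's closed form
theorem pvMain (n : Int) (hn : 1 ≤ n) (queries : List (List Int)) :
    pvSR ((List.range n.toNat).map (fun k : Nat => pvLE n 0 (PySem.List.enumerate queries 0) (k : Int)))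
         ((List.range n.toNat).map (fun k : Nat => pvLE n 1 (PySem.List.enumerate queries 0) (k : Int))) n +
    pvSC ((List.range n.toNat).map (fun k : Nat => pvLE n 1 (PySem.List.enumerate queries 0) (k : Int)))
         ((List.range n.toNat).map (fun k : Nat => pvLE n 0 (PySem.List.enumerate queries 0) (k : Int))) n =
      pvBF n ((PySem.List.enumerate queries 0).reverse) [] [] := by
  set E := PySem.List.enumerate queries 0 with hE
  have hposE : ∀ p ∈ E, 0 ≤ p.1 := by
    intro p hp
    rcases (PySem.List.mem_enumerate_iff queries 0 p).mp hp with ⟨k, hk, rfl⟩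
    simp
  have hinj := pvFst_inj E (PySem.List.pairwise_lt_enumerate queries 0)
  have htpos : ∀ t j, (pvLE n t E j).1 ≠ 0 → 1 ≤ (pvLE n t E j).1 := by
    intro t j hz
    rcases pvLE_cases n t E j with h | ⟨p, hp, h1, -, -⟩
    · rw [h] at hz; simp at hz
    · rw [h1]; have := hposE p hp; simp; omega
  have hzero : ∀ t j, (pvLE n t E j).1 = 0 → (pvLE n t E j).2 = 0 := by
    intro t j hz
    rcases pvLE_cases n t E j with h | ⟨p, hp, h1, -, -⟩
    · rw [h]
    · rw [h1] at hz ⊢; have := hposE p hp; exfalso; simp at hz; omega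
  have hne : ∀ j k : Int, (pvLE n 0 E j).1 ≠ 0 → (pvLE n 1 E k).1 ≠ 0 →
      (pvLE n 0 E j).1 ≠ (pvLE n 1 E k).1 := by
    intro j k h0 h1
    rcases pvLE_cases n 0 E j with h | ⟨p, hp, hp1, hp2, -⟩
    · rw [h] at h0; simp at h0
    rcases pvLE_cases n 1 E k with h | ⟨p', hp', hq1, hq2, -⟩
    · rw [h] at h1; simp at h1
    rw [hp1, hq1]
    intro hcontra
    simp only [] at hcontra
    have hpp : p.1 = p'.1 := by omega
    have := hinj p hp p' hp' hpp
    rw [this] at hp2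
    rw [hp2] at hq2
    norm_num at hq2
  unfold pvBF
  congr 1
  · -- row sums
    unfold pvSR
    rw [List.map_map]
    apply congrArg
    apply List.map_congr_left
    intro k hk
    simp only [Function.comp, pvFE_reverse]
    by_cases hz : (pvLE n 0 E (k : Int)).1 = 0
    · rw [if_neg (by rintro ⟨-, hc⟩; exact hc hz), hzero 0 _ hz, zero_mul]
    · rw [if_pos ⟨List.not_mem_nil, hz⟩]
      have hcge : pvCntGe (pvLE n 0 E (k : Int)).1
          ((List.range n.toNat).map (fun k' : Nat => pvLE n 1 E (k' : Int))) =
          pvCnt n 1 E.reverse [] (pvLE n 0 E (k : Int)).1 := by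
        rw [pvCnt_nil]
        unfold pvCntGe
        rw [List.countP_map]
        apply congrArg
        apply List.countP_congr
        intro k' hk'
        simp only [Function.comp, decide_eq_true_eq]
        constructor
        · intro hle
          have h1 : (pvLE n 1 E (k' : Int)).1 ≠ 0 := by
            have := htpos 0 (k : Int) hz; omega
          have := hne (k : Int) (k' : Int) hz h1
          omega
        · intro hlt; omega
      rw [hcge]
      simp only [List.length_nil, Nat.cast_zero]
      ring
  · -- col sums
    unfold pvSC
    rw [List.map_map]
    apply congrArg
    apply List.map_congr_left
    intro k hk
    simp only [Function.comp, pvFE_reverse]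
    by_cases hz : (pvLE n 1 E (k : Int)).1 = 0
    · rw [if_neg (by rintro ⟨-, hc⟩; exact hc hz), hzero 1 _ hz, zero_mul]
    · rw [if_pos ⟨List.not_mem_nil, hz⟩]
      have hcgt : pvCntGt (pvLE n 1 E (k : Int)).1
          ((List.range n.toNat).map (fun k' : Nat => pvLE n 0 E (k' : Int))) =
          pvCnt n 0 E.reverse [] (pvLE n 1 E (k : Int)).1 := by
        rw [pvCnt_nil]
        unfold pvCntGt
        rw [List.countP_map]
        rfl
      rw [hcgt]
      simp only [List.length_nil, Nat.cast_zero]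
      ring

-- permutation invariance of the A-side sums
theorem pvSR_perm (rs rs' cs cs' : List (Int × Int)) (h1 : rs.Perm rs') (h2 : cs.Perm cs')
    (v : Int) : pvSR rs cs v = pvSR rs' cs' v := by
  unfold pvSR
  have hf : ∀ e : Int × Int, e.2 * (v - pvCntGe e.1 cs) = e.2 * (v - pvCntGe e.1 cs') := by
    intro e
    unfold pvCntGe
    rw [h2.countP_eq]
  calc (rs.map (fun e => e.2 * (v - pvCntGe e.1 cs))).sum
      = (rs.map (fun e => e.2 * (v - pvCntGe e.1 cs'))).sum := by
        rw [List.map_congr_left (fun e _ => hf e)]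
    _ = (rs'.map (fun e => e.2 * (v - pvCntGe e.1 cs'))).sum := (h1.map _).sum_eq

theorem pvSC_perm (cs cs' rs rs' : List (Int × Int)) (h1 : cs.Perm cs') (h2 : rs.Perm rs')
    (v : Int) : pvSC cs rs v = pvSC cs' rs' v := by
  unfold pvSC
  have hf : ∀ e : Int × Int, e.2 * (v - pvCntGt e.1 rs) = e.2 * (v - pvCntGt e.1 rs') := by
    intro e
    unfold pvCntGt
    rw [h2.countP_eq]
  calc (cs.map (fun e => e.2 * (v - pvCntGt e.1 rs))).sum
      = (cs.map (fun e => e.2 * (v - pvCntGt e.1 rs'))).sum := by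
        rw [List.map_congr_left (fun e _ => hf e)]
    _ = (cs'.map (fun e => e.2 * (v - pvCntGt e.1 rs'))).sum := (h1.map _).sum_eq

-- B's value for n = 1 ending in a paint query: the last painted value
theorem pvAlt_one (qs : List (List Int)) (q : List Int) (hty : pvTy q = 0 ∨ pvTy q = 1) :
    matrixSumQueries_alt 1 (qs ++ [q]) = pvVal q := by
  rw [pvAlt_eq_BF 1 (by omega) (qs ++ [q])]
  have hrev : (PySem.List.enumerate (qs ++ [q]) 0).reverse =
      ((qs.length : Int), q) :: (PySem.List.enumerate qs 0).reverse := by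
    rw [PySem.List.enumerate_append, List.reverse_append]
    simp [PySem.List.enumerate_cons, PySem.List.enumerate_nil]
  rw [hrev]
  have hmod : pvIdx 1 q = 0 := by
    unfold pvIdx
    have h1 := PySem.Int.mod_nonneg (PySem.List.pyGetD q 1 0) (b := 1) (by omega)
    have h2 := PySem.Int.mod_lt (PySem.List.pyGetD q 1 0) (b := 1) (by omega)
    omega
  set R := (PySem.List.enumerate qs 0).reverse with hR
  have hb : ∀ t', (pvFE 1 t' R 0).1 ≤ (qs.length : Int) := by
    intro t'
    apply pvFE_le
    · intro p hp
      rw [hR, List.mem_reverse] at hp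
      rcases (PySem.List.mem_enumerate_iff qs 0 p).mp hp with ⟨k, hk, rfl⟩
      simp; omega
    · positivity
  have hrange1 : List.range (1 : Int).toNat = [0] := rfl
  rcases hty with hty | hty
  · have hFE0h : pvFE 1 0 (((qs.length : Int), q) :: R) 0 = ((qs.length : Int) + 1, pvVal q) :=
      if_pos ⟨hty, hmod⟩
    have hFE1h : ∀ j : Int, pvFE 1 1 (((qs.length : Int), q) :: R) j = pvFE 1 1 R j := by
      intro j
      exact if_neg (by rw [hty]; rintro ⟨hc, -⟩; norm_num at hc)
    unfold pvBF
    rw [hrange1]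
    simp only [List.map_cons, List.map_nil, List.sum_cons, List.sum_nil, Nat.cast_zero]
    rw [hFE0h, hFE1h]
    have hcnt1 : pvCnt 1 1 (((qs.length : Int), q) :: R) [] ((qs.length : Int) + 1) = 0 := by
      unfold pvCnt
      rw [hrange1]
      simp only [List.map_cons, List.map_nil, List.sum_cons, List.sum_nil, Nat.cast_zero]
      rw [hFE1h, if_neg (by rintro ⟨-, hc⟩; have := hb 1; omega)]
      norm_num
    rw [hcnt1]
    by_cases hc1 : (pvFE 1 1 R 0).1 ≠ 0
    · rw [if_pos ⟨List.not_mem_nil, by simp; omega⟩, if_pos ⟨List.not_mem_nil, hc1⟩]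
      have hcnt0 : pvCnt 1 0 (((qs.length : Int), q) :: R) [] ((pvFE 1 1 R 0).1) = 1 := by
        unfold pvCnt
        rw [hrange1]
        simp only [List.map_cons, List.map_nil, List.sum_cons, List.sum_nil, Nat.cast_zero]
        rw [hFE0h, if_pos ⟨List.not_mem_nil, by simp; have := hb 1; omega⟩]
        norm_num
      rw [hcnt0]
      simp only [List.length_nil, Nat.cast_zero]
      ring
    · rw [if_pos ⟨List.not_mem_nil, by simp; omega⟩, if_neg (by rintro ⟨-, hc⟩; exact hc1 hc)]
      simp only [List.length_nil, Nat.cast_zero]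
      ring
  · have hFE1h : pvFE 1 1 (((qs.length : Int), q) :: R) 0 = ((qs.length : Int) + 1, pvVal q) :=
      if_pos ⟨hty, hmod⟩
    have hFE0h : ∀ j : Int, pvFE 1 0 (((qs.length : Int), q) :: R) j = pvFE 1 0 R j := by
      intro j
      exact if_neg (by rw [hty]; rintro ⟨hc, -⟩; norm_num at hc)
    unfold pvBF
    rw [hrange1]
    simp only [List.map_cons, List.map_nil, List.sum_cons, List.sum_nil, Nat.cast_zero]
    rw [hFE1h, hFE0h]
    have hcnt0 : pvCnt 1 0 (((qs.length : Int), q) :: R) [] ((qs.length : Int) + 1) = 0 := by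
      unfold pvCnt
      rw [hrange1]
      simp only [List.map_cons, List.map_nil, List.sum_cons, List.sum_nil, Nat.cast_zero]
      rw [hFE0h, if_neg (by rintro ⟨-, hc⟩; have := hb 0; omega)]
      norm_num
    rw [hcnt0]
    by_cases hc1 : (pvFE 1 0 R 0).1 ≠ 0
    · rw [if_pos ⟨List.not_mem_nil, hc1⟩, if_pos ⟨List.not_mem_nil, by simp; omega⟩]
      have hcnt1 : pvCnt 1 1 (((qs.length : Int), q) :: R) [] ((pvFE 1 0 R 0).1) = 1 := by
        unfold pvCnt
        rw [hrange1]
        simp only [List.map_cons, List.map_nil, List.sum_cons, List.sum_nil, Nat.cast_zero]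
        rw [hFE1h, if_pos ⟨List.not_mem_nil, by simp; have := hb 0; omega⟩]
        norm_num
      rw [hcnt1]
      simp only [List.length_nil, Nat.cast_zero]
      ring
    · rw [if_neg (by rintro ⟨-, hc⟩; exact hc1 hc), if_pos ⟨List.not_mem_nil, by simp; omega⟩]
      simp only [List.length_nil, Nat.cast_zero]
      ring


-- A's update loop on the n ≤ 0 empty tables is a no-op
theorem pvASet_nil (i : Int) (v : Int × Int) : pvASet [] i v = [] := by
  simp [pvASet]

theorem pvAfold_nil : ∀ (es : List (Int × List Int)),
    es.foldl pvAStepE ([], []) = ([], []) := by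
  intro es
  induction es with
  | nil => rfl
  | cons e l ih =>
      rw [List.foldl_cons, show pvAStepE ([], []) e = ([], []) by
        simp only [pvAStepE]
        split_ifs <;> simp [pvASet_nil]]
      exact ih

-- B skips queries that are not paint queries
theorem pvBfold_skip (n : Int) : ∀ (l : List (List Int)) (st : PySem.Set Int × PySem.Set Int × Int),
    (∀ q ∈ l, ¬(PySem.List.pyGetD q 0 0 = 0 ∨ PySem.List.pyGetD q 0 0 = 1)) →
    l.foldl (pvBStep n) st = st := by
  intro l
  induction l with
  | nil => intro st _; rfl
  | cons q l ih =>
      intro st hall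
      rw [List.foldl_cons, show pvBStep n st q = st by
        unfold pvBStep
        rw [if_neg (fun hc => hall q (by simp) (Or.inl hc)),
            if_neg (fun hc => hall q (by simp) (Or.inr hc))]]
      exact ih st (fun q' hq' => hall q' (List.mem_cons_of_mem _ hq'))

-- A's range-indexed loop is the fold of pvAStepE over the enumeration
theorem pvA_loop_eq (queries : List (List Int)) (init : List (Int × Int) × List (Int × Int)) :
    (PySem.List.pyRange 0 (queries.length : Int) 1).foldl
      (fun rc i =>
        let q := PySem.List.pyGetD queries i []
        if PySem.List.pyGetD q 0 0 = 0 then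
          (pvASet rc.1 (PySem.List.pyGetD q 1 0) (i + 1, PySem.List.pyGetD q 2 0), rc.2)
        else if PySem.List.pyGetD q 0 0 = 1 then
          (rc.1, pvASet rc.2 (PySem.List.pyGetD q 1 0) (i + 1, PySem.List.pyGetD q 2 0))
        else rc)
      init =
    (PySem.List.enumerate queries 0).foldl pvAStepE init := by
  rw [PySem.List.enumerate_eq_map_pyRange queries ([] : List Int), List.foldl_map]
  rfl


-- xs[-1] on a nonempty list is its last element
theorem pvPyGetLast {α : Type} (l : List α) (a : α) :
    PySem.List.pyGet? (l ++ [a]) (-1) = some a := by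
  simp [PySem.List.pyGet?, PySem.List.pyIdx?]

-- ===== VERDICT (by name: the statement is the Claim_ definition above) =====
theorem matrixSumQueries_spec : Claim_unchanged_matrixSumQueries := by
  intro n queries hdom hpre
  unfold Spec_matrixSumQueries
  intro hnd
  obtain ⟨hcls, hne1, hq⟩ := hpre
  by_cases hn : n = 1
  · subst hn
    obtain ⟨hne, hgoodOrNp⟩ := hne1 rfl
    rcases List.eq_nil_or_concat queries with rfl | ⟨qs, q, rfl⟩
    · exact absurd rfl hne
    rw [List.concat_eq_append] at *
    rcases hgoodOrNp with hgood | hnp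
    · rw [List.getLastD_concat] at hgood
      obtain ⟨hlen, hty⟩ := hgood
      rw [pvAlt_one qs q hty]
      unfold matrixSumQueries
      rw [if_pos rfl]
      have hq3 : ∃ a b c : Int, q = [a, b, c] := by
        match q, hlen with
        | [a, b, c], _ => exact ⟨a, b, c, rfl⟩
      obtain ⟨a, b, c, rfl⟩ := hq3
      rw [pvPyGetLast]
      rfl
    · -- no paint query at all; outside D_ the last query ends in 0, and both sides are 0
      have hlast0 : ((qs ++ [q]).getLastD []).getLastD 0 = 0 := by
        by_contra hc
        exact hnd ⟨rfl, hne, hnp, hc⟩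
      rw [List.getLastD_concat] at hlast0
      unfold matrixSumQueries matrixSumQueries_alt
      rw [if_pos rfl, pvBfold_skip 1 (qs ++ [q]).reverse _
        (fun q' hq' => hnp q' (List.mem_reverse.mp hq'))]
      rw [pvPyGetLast]
      have hqne : q ≠ [] := by
        have := (hq q (by simp)).1
        intro hc
        rw [hc] at this
        simp at this
      rcases List.eq_nil_or_concat q with rfl | ⟨l, a, rfl⟩
      · exact absurd rfl hqne
      rw [List.concat_eq_append] at *
      rw [List.getLastD_concat] at hlast0
      simp only [Option.bind_some]
      rw [pvPyGetLast]
      simpa using hlast0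
  · by_cases hn1 : 1 ≤ n
    · have hn2 : 2 ≤ n := by omega
      unfold matrixSumQueries
      rw [if_neg hn]
      simp only []
      rw [pvA_loop_eq]
      have hqE : ∀ p ∈ PySem.List.enumerate queries 0, (pvTy p.2 = 0 ∨ pvTy p.2 = 1) →
          -n ≤ PySem.List.pyGetD p.2 1 0 ∧ PySem.List.pyGetD p.2 1 0 < n := by
        intro p hp hty
        rcases (PySem.List.mem_enumerate_iff queries 0 p).mp hp with ⟨k, hk, rfl⟩
        have hmem : queries[k] ∈ queries := List.getElem_mem hk
        exact ((hq _ hmem).2 hty).2 hn2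
      rw [pvA_arrays n (by omega) _ hqE]
      have hsp : ∀ xs : List (Int × Int),
          (PySem.List.sorted xs (fun x : Int × Int => x.1) true).Pairwise (fun a b => b.1 ≤ a.1) :=
        fun xs => PySem.List.sorted_pairwise_rev xs (fun x : Int × Int => x.1)
      rw [pvAMerge_eval _ _ n n 0 (hsp _) (hsp _), zero_add]
      rw [pvSR_perm _ _ _ _ (PySem.List.sorted_perm _ _ _) (PySem.List.sorted_perm _ _ _) n]
      rw [pvSC_perm _ _ _ _ (PySem.List.sorted_perm _ _ _) (PySem.List.sorted_perm _ _ _) n]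
      rw [pvAlt_eq_BF n (by omega) queries, ← pvMain n (by omega) queries]
    · -- n ≤ 0 (and n ≠ 1): Pre_ guarantees there is no paint query, so both sides are 0
      have hall : ∀ q ∈ queries,
          ¬(PySem.List.pyGetD q 0 0 = 0 ∨ PySem.List.pyGetD q 0 0 = 1) :=
        hcls.resolve_left hn1
      have hrepl : List.replicate n.toNat ((0 : Int), (0 : Int)) = [] := by
        rw [show n.toNat = 0 by omega]
        rfl
      unfold matrixSumQueries
      rw [if_neg hn]
      simp only []
      rw [pvA_loop_eq, hrepl, pvAfold_nil]
      unfold matrixSumQueries_alt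
      rw [pvBfold_skip n queries.reverse _
        (fun q' hq' => hall q' (List.mem_reverse.mp hq'))]
      have hs : PySem.List.sorted ([] : List (Int × Int)) (fun x : Int × Int => x.1) true = [] := by
        rw [PySem.List.sorted_eq_nil_iff]
      show pvAMerge (PySem.List.sorted ([] : List (Int × Int)) (fun x : Int × Int => x.1) true)
        (PySem.List.sorted ([] : List (Int × Int)) (fun x : Int × Int => x.1) true) n n 0 = _
      rw [hs]
      simp [pvAMerge]

theorem matrixSumQueries_tight : Claim_exact_matrixSumQueries := by
  intro n queries hdom hpre hd
  obtain ⟨hn1, hne, hnp, hlast⟩ := hd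
  subst hn1
  obtain ⟨-, -, hq⟩ := hpre
  have hB : matrixSumQueries_alt 1 queries = 0 := by
    unfold matrixSumQueries_alt
    rw [pvBfold_skip 1 queries.reverse _
      (fun q' hq' => hnp q' (List.mem_reverse.mp hq'))]
  rw [hB]
  rcases List.eq_nil_or_concat queries with rfl | ⟨qs, q, rfl⟩
  · exact absurd rfl hne
  rw [List.concat_eq_append] at *
  rw [List.getLastD_concat] at hlast
  have hqne : q ≠ [] := by
    have := (hq q (by simp)).1
    intro hc
    rw [hc] at this
    simp at this
  rcases List.eq_nil_or_concat q with rfl | ⟨l, a, rfl⟩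
  · exact absurd rfl hqne
  rw [List.concat_eq_append] at *
  rw [List.getLastD_concat] at hlast
  unfold matrixSumQueries
  rw [if_pos rfl, pvPyGetLast]
  simp only [Option.bind_some]
  rw [pvPyGetLast]
  simpa using hlast

theorem matrixSumQueries_changed : Claim_changed_matrixSumQueries := by
  unfold Claim_changed_matrixSumQueries; decide
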